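-- pv_equiv track=rewrite | github.com/avalanchesiqi/twitter-sampling | utils/bowtie.py | is_out_component
-- ===== SOURCE A (Python) =====
-- def is_out_component(scc, graph_embedding, largest_scc):
--     # is scc an OUT component to largest_scc?
--     out_nodes = set()
--     for src in largest_scc:
--         out_nodes.update(graph_embedding[src])
--     if len(out_nodes.intersection(set(scc))) > 0:
--         return True
--     else:
--         return False
-- ===== SOURCE B (Python) =====
-- def is_out_component(scc, graph_embedding, largest_scc):
--     # Sort-then-merge: flatten all out-edges of largest_scc into one sorted list,
--     # sort scc, and detect a common element by a two-pointer merge scan.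
--     out = sorted(d for src in largest_scc for d in graph_embedding[src])
--     tgt = sorted(scc)
--     i = j = 0
--     while i < len(out) and j < len(tgt):
--         if out[i] == tgt[j]:
--             return True
--         if out[i] < tgt[j]:
--             i += 1
--         else:
--             j += 1
--     return False
-- ===== Notes on version B (the rewrite author's own statement) =====
-- stated objective: alternative
-- what changed: Replaces A's hash-set union + set intersection by a sort-then-merge algorithm: flatten the out-edges into one list, sort it and sort scc, then find a common element with a two-pointer merge scan.
import Mathlib
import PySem

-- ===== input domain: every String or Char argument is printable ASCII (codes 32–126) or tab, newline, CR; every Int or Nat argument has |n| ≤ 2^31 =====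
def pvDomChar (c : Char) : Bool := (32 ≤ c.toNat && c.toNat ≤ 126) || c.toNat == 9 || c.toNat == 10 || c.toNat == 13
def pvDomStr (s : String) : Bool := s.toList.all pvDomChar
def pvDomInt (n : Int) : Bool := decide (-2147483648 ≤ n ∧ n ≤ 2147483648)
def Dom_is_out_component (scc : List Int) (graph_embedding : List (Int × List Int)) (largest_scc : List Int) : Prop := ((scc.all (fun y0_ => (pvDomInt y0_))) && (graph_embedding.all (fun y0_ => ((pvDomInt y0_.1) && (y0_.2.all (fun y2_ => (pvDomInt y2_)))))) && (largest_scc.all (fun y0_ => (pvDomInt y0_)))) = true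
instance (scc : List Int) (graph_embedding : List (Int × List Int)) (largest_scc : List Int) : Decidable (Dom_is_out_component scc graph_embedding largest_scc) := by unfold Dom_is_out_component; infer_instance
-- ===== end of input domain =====

-- B replaces A's hash-set union + intersection by sort-then-merge: flatten the
-- out-edges, sort both sides, and find a common element by a two-pointer merge scan
-- (alternative algorithm, same purpose).

-- ===== PORT A =====
def is_out_component (scc : List Int) (graph_embedding : List (Int × List Int)) (largest_scc : List Int) : Bool :=
  let out_nodes : PySem.Set Int :=
    largest_scc.foldl
      (fun s src => PySem.Set.update s ((PySem.Dict.mk graph_embedding).getD src []))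
      PySem.Set.empty
  if PySem.Set.len (PySem.Set.inter out_nodes (PySem.Set.ofList scc)) > 0 then true else false

-- ===== PORT B =====
-- Source B's while loop over indices i, j, transcribed as the equivalent recursion on
-- the two sorted lists (each step drops exactly the element the index passes).
def pvMergeHit : List Int → List Int → Bool
  | x :: xs, y :: ys =>
    if x = y then true
    else if x < y then pvMergeHit xs (y :: ys)
    else pvMergeHit (x :: xs) ys
  | _, _ => false

def is_out_component_alt (scc : List Int) (graph_embedding : List (Int × List Int)) (largest_scc : List Int) : Bool :=
  let out := PySem.List.sorted (largest_scc.flatMap (fun src => (PySem.Dict.mk graph_embedding).getD src [])) (fun x => x) false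
  let tgt := PySem.List.sorted scc (fun x => x) false
  pvMergeHit out tgt

-- ===== PRECONDITION & SPEC =====
-- Pre_ excludes exactly the inputs where graph_embedding[src] raises KeyError in both Pythons.
def Pre_is_out_component (scc : List Int) (graph_embedding : List (Int × List Int)) (largest_scc : List Int) : Prop :=
  ∀ src ∈ largest_scc, src ∈ graph_embedding.map Prod.fst
instance (scc : List Int) (graph_embedding : List (Int × List Int)) (largest_scc : List Int) : Decidable (Pre_is_out_component scc graph_embedding largest_scc) := by unfold Pre_is_out_component; infer_instance
def pvWitness_is_out_component : List Int × (List (Int × List Int)) × List Int :=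
  ([2, 3], [(0, [2, 5]), (1, [])], [0, 1])
def Spec_is_out_component (scc : List Int) (graph_embedding : List (Int × List Int)) (largest_scc : List Int) (out : Bool) : Prop := out = is_out_component_alt scc graph_embedding largest_scc
instance (scc : List Int) (graph_embedding : List (Int × List Int)) (largest_scc : List Int) (out : Bool) : Decidable (Spec_is_out_component scc graph_embedding largest_scc out) := by unfold Spec_is_out_component; infer_instance

-- ===== CLAIM (what is proved, stated in full; the proofs are below) =====
def Claim_equal_is_out_component : Prop := ∀ (scc : List Int) (graph_embedding : List (Int × List Int)) (largest_scc : List Int), Dom_is_out_component scc graph_embedding largest_scc → Pre_is_out_component scc graph_embedding largest_scc → Spec_is_out_component scc graph_embedding largest_scc (is_out_component scc graph_embedding largest_scc)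

-- ===== LEMMAS AND PROOFS =====
-- membership in the out-node union built by A's fold
theorem mem_foldl_update (ge : List (Int × List Int)) (l : List Int) (s : PySem.Set Int) (x : Int) :
    x ∈ l.foldl (fun s src => PySem.Set.update s ((PySem.Dict.mk ge).getD src [])) s ↔
      x ∈ s ∨ ∃ src ∈ l, x ∈ (PySem.Dict.mk ge).getD src [] := by
  induction l generalizing s with
  | nil => simp
  | cons a t ih =>
    simp only [List.foldl_cons, ih, PySem.Set.mem_update, List.mem_cons]
    constructor
    · rintro (⟨h | h⟩ | ⟨src, hs, hx⟩)
      · exact Or.inl h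
      · exact Or.inr ⟨a, Or.inl rfl, h⟩
      · exact Or.inr ⟨src, Or.inr hs, hx⟩
    · rintro (h | ⟨src, (rfl | hs), hx⟩)
      · exact Or.inl (Or.inl h)
      · exact Or.inl (Or.inr hx)
      · exact Or.inr ⟨src, hs, hx⟩

-- on sorted lists, the merge scan hits iff the lists share an element
theorem mergeHit_iff (xs ys : List Int) (hx : xs.Pairwise (· ≤ ·)) (hy : ys.Pairwise (· ≤ ·)) :
    pvMergeHit xs ys = true ↔ ∃ c, c ∈ xs ∧ c ∈ ys := by
  induction xs, ys using pvMergeHit.induct with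
  | case1 xs y ys =>
    simp [pvMergeHit]
  | case2 x xs y ys hne hlt ih =>
    rw [pvMergeHit, if_neg hne, if_pos hlt,
      ih (List.Pairwise.of_cons hx) hy]
    constructor
    · rintro ⟨c, hc1, hc2⟩; exact ⟨c, List.mem_cons_of_mem _ hc1, hc2⟩
    · rintro ⟨c, hc1, hc2⟩
      rcases List.mem_cons.1 hc1 with rfl | hc1
      · -- c = x is in y :: ys, but everything there is ≥ y > x
        exfalso
        rcases List.mem_cons.1 hc2 with rfl | hc2
        · exact hne rfl
        · have := (List.pairwise_cons.1 hy).1 c hc2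
          omega
      · exact ⟨c, hc1, hc2⟩
  | case3 x xs y ys hne hlt ih =>
    rw [pvMergeHit, if_neg hne, if_neg hlt,
      ih hx (List.Pairwise.of_cons hy)]
    constructor
    · rintro ⟨c, hc1, hc2⟩; exact ⟨c, hc1, List.mem_cons_of_mem _ hc2⟩
    · rintro ⟨c, hc1, hc2⟩
      rcases List.mem_cons.1 hc2 with rfl | hc2
      · exfalso
        rcases List.mem_cons.1 hc1 with rfl | hc1
        · exact hne rfl
        · have := (List.pairwise_cons.1 hx).1 c hc1
          omega
      · exact ⟨c, hc1, hc2⟩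
  | case4 xs ys h =>
    cases xs with
    | nil => simp [pvMergeHit]
    | cons a t =>
      cases ys with
      | nil => simp [pvMergeHit]
      | cons b u => exact (h a t b u rfl rfl).elim

-- both ports decide the same proposition: some out-edge target lies in scc
theorem alt_iff (scc : List Int) (ge : List (Int × List Int)) (largest : List Int) :
    is_out_component_alt scc ge largest = true ↔
      ∃ c, (∃ src ∈ largest, c ∈ (PySem.Dict.mk ge).getD src []) ∧ c ∈ scc := by
  unfold is_out_component_alt
  rw [mergeHit_iff _ _ (PySem.List.sorted_pairwise _ _) (PySem.List.sorted_pairwise _ _)]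
  simp only [PySem.List.mem_sorted, List.mem_flatMap]

-- ===== VERDICT (by name: the statement is the Claim_ definition above) =====
theorem is_out_component_spec : Claim_equal_is_out_component := by
  intro scc ge largest _ _
  unfold Spec_is_out_component
  unfold is_out_component
  simp only [PySem.Set.len, gt_iff_lt]
  by_cases h : ∃ c, (∃ src ∈ largest, c ∈ (PySem.Dict.mk ge).getD src []) ∧ c ∈ scc
  · obtain ⟨c, ⟨src, hs, hd⟩, hscc⟩ := h
    have hcmem : c ∈ PySem.Set.inter
        (largest.foldl (fun s src => PySem.Set.update s ((PySem.Dict.mk ge).getD src [])) PySem.Set.empty)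
        (PySem.Set.ofList scc) := by
      rw [PySem.Set.mem_inter]
      exact ⟨(mem_foldl_update ge largest _ c).2 (Or.inr ⟨src, hs, hd⟩),
        (PySem.Set.mem_ofList _ _).2 hscc⟩
    have hlen : (0 : Int) < (List.length (PySem.Set.inter
        (largest.foldl (fun s src => PySem.Set.update s ((PySem.Dict.mk ge).getD src [])) PySem.Set.empty)
        (PySem.Set.ofList scc)) : Int) := by
      exact_mod_cast List.length_pos_of_mem hcmem
    rw [if_pos hlen]
    exact ((alt_iff scc ge largest).2 ⟨c, ⟨src, hs, hd⟩, hscc⟩).symm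
  · have hnil : PySem.Set.inter
        (largest.foldl (fun s src => PySem.Set.update s ((PySem.Dict.mk ge).getD src [])) PySem.Set.empty)
        (PySem.Set.ofList scc) = [] := by
      rw [List.eq_nil_iff_forall_not_mem]
      intro x hx
      rw [PySem.Set.mem_inter, mem_foldl_update, PySem.Set.mem_ofList] at hx
      rcases hx with ⟨(h0 | ⟨src, hs, hd⟩), hscc⟩
      · simp [PySem.Set.empty] at h0
      · exact h ⟨x, ⟨src, hs, hd⟩, hscc⟩
    rw [hnil]
    simp only [List.length_nil, Nat.cast_zero, lt_irrefl, if_false]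
    symm
    rw [Bool.eq_false_iff, Ne, alt_iff]
    exact h
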